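-- pv_equiv track=rewrite | github.com/muroyamasusumu-Git/cscs_quiz_html | _local_protocol_tool/local_protocol_tool.py | _line_start_offsets
-- ===== SOURCE A (Python) =====
-- from typing import List, Tuple, Optional
--
-- def _line_start_offsets(s: str) -> List[int]:
--     """
--     各行の開始オフセット配列を作る（行番号→オフセット変換用）
--     """
--     offs = [0]
--     i = 0
--     n = len(s)
--     while i < n:
--         j = s.find("\n", i)
--         if j == -1:
--             break
--         offs.append(j + 1)
--         i = j + 1
--     return offs
-- ===== SOURCE B (Python) =====
-- def _line_start_offsets(s: str):
--     return [0] + [i + 1 for i, c in enumerate(s) if c == "\n"]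
-- ===== Notes on version B (the rewrite author's own statement) =====
-- stated objective: simpler
-- what changed: Replaced the while-loop state machine that repeatedly calls str.find for the next newline and jumps the index with a single enumerate comprehension that collects i+1 at every newline position.
import Mathlib
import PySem

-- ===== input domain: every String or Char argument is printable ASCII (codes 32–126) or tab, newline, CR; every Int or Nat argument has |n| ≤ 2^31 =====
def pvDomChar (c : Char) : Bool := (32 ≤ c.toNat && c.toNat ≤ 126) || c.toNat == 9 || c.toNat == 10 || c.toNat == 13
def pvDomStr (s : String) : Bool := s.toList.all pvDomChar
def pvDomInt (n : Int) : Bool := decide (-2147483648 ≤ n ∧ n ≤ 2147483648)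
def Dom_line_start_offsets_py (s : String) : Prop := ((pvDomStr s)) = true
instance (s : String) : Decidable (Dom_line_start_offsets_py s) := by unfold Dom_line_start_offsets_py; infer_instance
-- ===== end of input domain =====

-- B replaces A's while-loop of repeated str.find calls with a single enumerate
-- comprehension collecting i+1 at each newline (objective: simpler).

-- ===== PORT A =====
-- the 'while i < n' loop of A: state (i, offs); termination lemma cited below
theorem lsoLoop_dec (s : String) (i : Nat) (h : i < s.length)
    (j : Int) (hj : j = PySem.Str.findFrom s "\n" (i : Int)) (hne : j ≠ -1) :
    s.length - (j.toNat + 1) < s.length - i := by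
  have hlen : s.length = s.toList.length := rfl
  have hk : i ≤ s.toList.length := by omega
  have := PySem.Chars.findFrom_natCast_spec s.toList "\n".toList i hk
  rw [PySem.Str.findFrom_eq] at hj
  have hij : (i : Int) ≤ j := by
    subst hj; exact (this (by simpa using hne)).1
  omega

def lsoLoop (s : String) (i : Nat) (offs : List Int) : List Int :=
  if h : i < s.length then
    let j := PySem.Str.findFrom s "\n" (i : Int)
    if hne : j = -1 then offs
    else lsoLoop s (j.toNat + 1) (offs ++ [j + 1])
  else offs
termination_by s.length - i
decreasing_by exact lsoLoop_dec s i h _ rfl hne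

def line_start_offsets_py (s : String) : List Int := lsoLoop s 0 [0]

-- ===== PORT B =====
def line_start_offsets_py_alt (s : String) : List Int :=
  (0 : Int) ::
    ((PySem.List.enumerate s.toList 0).filter (fun p => p.2 == '\n')).map (fun p => p.1 + 1)

-- ===== PRECONDITION & SPEC =====
def Spec_line_start_offsets_py (s : String) (out : List Int) : Prop := out = line_start_offsets_py_alt s
instance (s : String) (out : List Int) : Decidable (Spec_line_start_offsets_py s out) := by unfold Spec_line_start_offsets_py; infer_instance

-- ===== CLAIM (what is proved, stated in full; the proofs are below) =====
def Claim_equal_line_start_offsets_py : Prop := ∀ (s : String), Dom_line_start_offsets_py s → Spec_line_start_offsets_py s (line_start_offsets_py s)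

-- ===== LEMMAS AND PROOFS =====

-- the newline-offset list of cs when cs starts at absolute offset k
def nl (cs : List Char) (k : Int) : List Int :=
  ((PySem.List.enumerate cs k).filter (fun p => p.2 == '\n')).map (fun p => p.1 + 1)

theorem nl_nil (k : Int) : nl [] k = [] := by
  simp [nl, PySem.List.enumerate_nil]

theorem nl_cons (c : Char) (cs : List Char) (k : Int) :
    nl (c :: cs) k = if c = '\n' then (k + 1) :: nl cs (k + 1) else nl cs (k + 1) := by
  simp [nl, PySem.List.enumerate_cons]
  split_ifs with h <;> simp [h]

theorem nl_append (xs ys : List Char) (k : Int) :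
    nl (xs ++ ys) k = nl xs k ++ nl ys (k + xs.length) := by
  simp [nl, PySem.List.enumerate_append]

theorem nl_of_not_mem (cs : List Char) (k : Int) (h : '\n' ∉ cs) : nl cs k = [] := by
  induction cs generalizing k with
  | nil => exact nl_nil k
  | cons c cs ih =>
    rw [nl_cons]
    have hc : c ≠ '\n' := by intro hc; exact h (hc ▸ List.mem_cons_self)
    simp [hc, ih (k + 1) (fun hm => h (List.mem_cons_of_mem _ hm))]

theorem nl_skip (cs : List Char) (k : Int) (m : Nat)
    (h : '\n' ∉ cs.take m) : nl cs k = nl (cs.drop m) (k + (cs.take m).length) := by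
  conv_lhs => rw [← List.take_append_drop m cs]
  rw [nl_append, nl_of_not_mem _ _ h, List.nil_append]

theorem singleton_infix {a : Char} {l : List Char} : [a] <:+: l ↔ a ∈ l := by
  constructor
  · intro h; exact h.sublist.subset List.mem_cons_self
  · intro h
    obtain ⟨t, u, rfl⟩ := List.append_of_mem h
    exact ⟨t, u, by simp⟩

theorem singleton_prefix_drop {a : Char} {l : List Char} {m : Nat} (hm : m < l.length)
    (h : l[m] = a) : [a] <+: l.drop m := by
  have : l.drop m = a :: l.drop (m + 1) := by
    rw [List.drop_eq_getElem_cons hm, h]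
  rw [this]; exact ⟨l.drop (m + 1), rfl⟩

theorem lsoLoop_eq (s : String) (i : Nat) (offs : List Int) (hi : i ≤ s.toList.length) :
    lsoLoop s i offs = offs ++ nl (s.toList.drop i) i := by
  have hlen : s.length = s.toList.length := rfl
  by_cases h : i < s.length
  · -- one newline-search step
    have hfind := PySem.Chars.findFrom_natCast s.toList "\n".toList i hi
    have hnl : "\n".toList = ['\n'] := by decide
    set f := PySem.Chars.find (s.toList.drop i) ['\n'] with hf
    by_cases hneg : f = -1
    · -- no further newline: loop stops, nl is empty
      rw [lsoLoop]
      have hjv : PySem.Str.findFrom s "\n" (i : Int) = -1 := by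
        rw [PySem.Str.findFrom_eq, hfind, hnl, ← hf, hneg]; simp
      simp only [h, dif_pos, hjv]
      have hmem : '\n' ∉ s.toList.drop i := by
        intro hm
        exact (PySem.Chars.find_eq_neg_one_iff _ _ |>.mp (hnl ▸ hneg))
          (singleton_infix.mpr hm)
      rw [nl_of_not_mem _ _ hmem, List.append_nil]
    · -- newline found at absolute position i + f
      have hf0 : 0 ≤ f := by
        have := PySem.Chars.neg_one_le_find (s.toList.drop i) ['\n']
        rw [← hf] at this; omega
      have hspec := PySem.Chars.find_spec (s := s.toList.drop i) (sub := ['\n']) (by rw [← hf]; exact hf0)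
      obtain ⟨hpre, hmin⟩ := hspec
      rw [← hf] at hpre hmin
      have hflt : f.toNat < (s.toList.drop i).length := by
        rcases hpre with ⟨t, ht⟩
        have h1 := congrArg List.length ht
        simp only [List.length_append, List.length_cons, List.length_nil, List.length_drop] at h1
        simp only [List.length_drop]
        omega
      have hjv : PySem.Str.findFrom s "\n" (i : Int) = (i : Int) + f := by
        rw [PySem.Str.findFrom_eq, hfind, hnl, ← hf]; simp [hneg]
      have hjne : ((i : Int) + f) ≠ -1 := by omega
      have hjt : ((i : Int) + f).toNat = i + f.toNat := by omega
      rw [lsoLoop]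
      simp only [h, dif_pos, hjv, dif_neg hjne, hjt]
      -- (step value j = i + f)
      -- recursive call via induction hypothesis
      have hlt : i + f.toNat + 1 ≤ s.toList.length := by
        simp [List.length_drop] at hflt; omega
      have ih := lsoLoop_eq s (i + f.toNat + 1) (offs ++ [(i : Int) + f + 1]) hlt
      rw [ih]
      -- rewrite nl (drop i) using the minimality of f
      have hnot : '\n' ∉ (s.toList.drop i).take f.toNat := by
        intro hm
        obtain ⟨m, hmlt, hme⟩ := List.getElem_of_mem hm
        have hmlt' : m < f.toNat := by simp at hmlt; omega
        have hm2 : m < (s.toList.drop i).length := by omega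
        rw [List.getElem_take] at hme
        exact hmin m hmlt' (singleton_prefix_drop hm2 hme)
      have htl : ((s.toList.drop i).take f.toNat).length = f.toNat := by
        simp; omega
      have hdd : (s.toList.drop i).drop f.toNat = s.toList.drop (i + f.toNat) := by
        rw [List.drop_drop]
      have hcons : s.toList.drop (i + f.toNat) = '\n' :: s.toList.drop (i + f.toNat + 1) := by
        rcases hpre with ⟨t, ht⟩
        rw [hdd] at ht
        have h2 : s.toList.drop (i + f.toNat) = '\n' :: t := ht.symm
        have h3 : s.toList.drop (i + f.toNat + 1) = t := by
          have h4 := congrArg (List.drop 1) h2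
          rw [List.drop_drop] at h4
          simpa using h4
        rw [h2, h3]
      rw [nl_skip (s.toList.drop i) (i : Int) f.toNat hnot, htl, hdd, hcons, nl_cons,
        if_pos rfl]
      have hcast : (i : Int) + f.toNat = (i : Int) + f := by omega
      have hcast2 : ((i + f.toNat + 1 : Nat) : Int) = (i : Int) + f + 1 := by omega
      rw [hcast, hcast2, List.append_assoc]
      rfl
  · -- i = length: loop exits, suffix is empty
    rw [lsoLoop, dif_neg h]
    have : i = s.toList.length := by omega
    rw [this, List.drop_length, nl_nil, List.append_nil]
termination_by s.toList.length - i
decreasing_by omega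

-- ===== VERDICT (by name: the statement is the Claim_ definition above) =====
theorem line_start_offsets_py_spec : Claim_equal_line_start_offsets_py := by
  intro s _
  unfold Spec_line_start_offsets_py line_start_offsets_py line_start_offsets_py_alt
  rw [lsoLoop_eq s 0 [0] (Nat.zero_le _)]
  simp [nl]
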